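-- pv_equiv track=rewrite | github.com/sanrootrobo/Summarizer | summerization_GUI7.py | _get_source_type_summary
-- ===== SOURCE A (Python) =====
-- def _get_source_type_summary(source_data: dict[str, str]) -> str:
--     """Get a summary of source types"""
--     types = {"Web": 0, "YouTube": 0, "Local": 0}
--
--     for source_url in source_data.keys():
--         if 'youtube.com' in source_url:
--             types["YouTube"] += 1
--         elif source_url.startswith('http'):
--             types["Web"] += 1
--         else:
--             types["Local"] += 1
--
--     return ", ".join([f"{k}: {v}" for k, v in types.items() if v > 0])
-- ===== SOURCE B (Python) =====
-- def _get_source_type_summary(source_data: dict[str, str]) -> str: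
--     """Get a summary of source types"""
--     youtube = sum('youtube.com' in u for u in source_data)
--     web = sum(u.startswith('http') and 'youtube.com' not in u for u in source_data)
--     local = len(source_data) - youtube - web
--     counts = {"Web": web, "YouTube": youtube, "Local": local}
--     return ", ".join(f"{k}: {v}" for k, v in counts.items() if v > 0)
-- ===== Notes on version B (the rewrite author's own statement) =====
-- stated objective: alternative
-- what changed: Replaces the single ordered loop that branches into a mutable counts dict with three independent aggregate reductions (sum of youtube hits, sum of non-youtube http hits, and local as len minus the other two), then assembles the Web/YouTube/Local summary string from those totals.
import Mathlib
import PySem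

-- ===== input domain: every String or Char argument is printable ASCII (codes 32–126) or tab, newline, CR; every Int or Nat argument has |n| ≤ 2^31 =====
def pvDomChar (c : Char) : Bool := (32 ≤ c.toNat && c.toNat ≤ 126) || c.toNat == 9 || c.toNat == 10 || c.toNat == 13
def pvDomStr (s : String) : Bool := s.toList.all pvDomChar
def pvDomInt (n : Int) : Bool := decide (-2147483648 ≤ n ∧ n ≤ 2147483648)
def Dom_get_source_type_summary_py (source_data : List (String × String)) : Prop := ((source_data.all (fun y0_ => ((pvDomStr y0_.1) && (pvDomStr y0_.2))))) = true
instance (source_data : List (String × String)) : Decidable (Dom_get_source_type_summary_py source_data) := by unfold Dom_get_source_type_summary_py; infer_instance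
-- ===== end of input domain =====

-- B replaces A's single branching loop over a mutable counts dict with three independent countP-style reductions (YouTube, non-YouTube http, Local = rest), then formats the same Web/YouTube/Local summary; alternative decomposition, same cost.


-- ===== PORT A =====
def get_source_type_summary_py (source_data : List (String × String)) : String :=
  let types : PySem.Dict String Int :=
    (((PySem.Dict.empty).insert "Web" 0).insert "YouTube" 0).insert "Local" 0
  let types := source_data.foldl (fun d kv =>
    if PySem.Str.isIn "youtube.com" kv.1 then
      d.insert "YouTube" (d.getD "YouTube" 0 + 1)
    else if PySem.Str.startswith kv.1 "http" then
      d.insert "Web" (d.getD "Web" 0 + 1)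
    else
      d.insert "Local" (d.getD "Local" 0 + 1)) types
  PySem.Str.join ", "
    ((types.items.filter (fun kv => decide ((0:Int) < kv.2))).map
      (fun kv => kv.1 ++ ": " ++ PySem.Int.toStr kv.2))

-- ===== PORT B =====
def get_source_type_summary_py_alt (source_data : List (String × String)) : String :=
  let youtube : Int := source_data.countP (fun kv => PySem.Str.isIn "youtube.com" kv.1)
  let web : Int := source_data.countP (fun kv =>
    PySem.Str.startswith kv.1 "http" && !(PySem.Str.isIn "youtube.com" kv.1))
  let localN : Int := (source_data.length : Int) - youtube - web
  let counts : List (String × Int) := [("Web", web), ("YouTube", youtube), ("Local", localN)]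
  PySem.Str.join ", "
    ((counts.filter (fun kv => decide ((0:Int) < kv.2))).map
      (fun kv => kv.1 ++ ": " ++ PySem.Int.toStr kv.2))

-- ===== PRECONDITION & SPEC =====
def Spec_get_source_type_summary_py (source_data : List (String × String)) (out : String) : Prop := out = get_source_type_summary_py_alt source_data
instance (source_data : List (String × String)) (out : String) : Decidable (Spec_get_source_type_summary_py source_data out) := by unfold Spec_get_source_type_summary_py; infer_instance

-- ===== CLAIM (what is proved, stated in full; the proofs are below) =====
def Claim_equal_get_source_type_summary_py : Prop := ∀ (source_data : List (String × String)), Dom_get_source_type_summary_py source_data → Spec_get_source_type_summary_py source_data (get_source_type_summary_py source_data)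



-- ===== LEMMAS AND PROOFS =====
def pvStep (d : PySem.Dict String Int) (kv : String × String) : PySem.Dict String Int :=
  if PySem.Str.isIn "youtube.com" kv.1 then
    d.insert "YouTube" (d.getD "YouTube" 0 + 1)
  else if PySem.Str.startswith kv.1 "http" then
    d.insert "Web" (d.getD "Web" 0 + 1)
  else
    d.insert "Local" (d.getD "Local" 0 + 1)

def pvMkd (a b c : Int) : PySem.Dict String Int :=
  (((PySem.Dict.empty).insert "Web" a).insert "YouTube" b).insert "Local" c

def pvY (kv : String × String) : Bool := PySem.Str.isIn "youtube.com" kv.1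
def pvW (kv : String × String) : Bool := !pvY kv && PySem.Str.startswith kv.1 "http"
def pvL (kv : String × String) : Bool := !pvY kv && !PySem.Str.startswith kv.1 "http"

lemma pvMkd_congr {a b c a' b' c' : Int} (h1 : a = a') (h2 : b = b') (h3 : c = c') :
    pvMkd a b c = pvMkd a' b' c' := by rw [h1, h2, h3]

lemma pvMkd_insertY (a b c v : Int) : (pvMkd a b c).insert "YouTube" v = pvMkd a v c := rfl
lemma pvMkd_insertW (a b c v : Int) : (pvMkd a b c).insert "Web" v = pvMkd v b c := rfl
lemma pvMkd_insertL (a b c v : Int) : (pvMkd a b c).insert "Local" v = pvMkd a b v := rfl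
lemma pvMkd_getY (a b c : Int) : (pvMkd a b c).getD "YouTube" 0 = b := rfl
lemma pvMkd_getW (a b c : Int) : (pvMkd a b c).getD "Web" 0 = a := rfl
lemma pvMkd_getL (a b c : Int) : (pvMkd a b c).getD "Local" 0 = c := rfl

lemma pvLoop (l : List (String × String)) (a b c : Int) :
    l.foldl pvStep (pvMkd a b c)
      = pvMkd (a + l.countP pvW) (b + l.countP pvY) (c + l.countP pvL) := by
  induction l generalizing a b c with
  | nil => simp
  | cons x t ih =>
    simp only [List.foldl_cons, List.countP_cons]
    cases hy : PySem.Str.isIn "youtube.com" x.1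
    · cases hst : PySem.Str.startswith x.1 "http"
      · rw [show pvStep (pvMkd a b c) x = pvMkd a b (c + 1) by
              simp [pvStep, hy, hst, -PySem.Str.isIn_eq, -PySem.Str.startswith_eq,
                pvMkd_getL, pvMkd_insertL], ih]
        apply pvMkd_congr <;>
          simp [pvW, pvY, pvL, hy, hst, -PySem.Str.isIn_eq, -PySem.Str.startswith_eq] <;>
          push_cast <;> ring
      · rw [show pvStep (pvMkd a b c) x = pvMkd (a + 1) b c by
              simp [pvStep, hy, hst, -PySem.Str.isIn_eq, -PySem.Str.startswith_eq,
                pvMkd_getW, pvMkd_insertW], ih]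
        apply pvMkd_congr <;>
          simp [pvW, pvY, pvL, hy, hst, -PySem.Str.isIn_eq, -PySem.Str.startswith_eq] <;>
          push_cast <;> ring
    · rw [show pvStep (pvMkd a b c) x = pvMkd a (b + 1) c by
            simp [pvStep, hy, -PySem.Str.isIn_eq, -PySem.Str.startswith_eq,
              pvMkd_getY, pvMkd_insertY], ih]
      apply pvMkd_congr <;>
        simp [pvW, pvY, pvL, hy, -PySem.Str.isIn_eq, -PySem.Str.startswith_eq] <;>
        push_cast <;> ring

lemma pvTri (l : List (String × String)) :
    l.countP pvW + l.countP pvY + l.countP pvL = l.length := by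
  induction l with
  | nil => rfl
  | cons x t ih =>
    simp only [List.countP_cons, List.length_cons]
    cases hy : PySem.Str.isIn "youtube.com" x.1 <;>
      cases hst : PySem.Str.startswith x.1 "http" <;>
      simp [pvW, pvY, pvL, hy, hst, -PySem.Str.isIn_eq, -PySem.Str.startswith_eq] <;>
      omega

lemma pvWB (l : List (String × String)) :
    l.countP (fun kv => PySem.Str.startswith kv.1 "http" && !(PySem.Str.isIn "youtube.com" kv.1))
      = l.countP pvW := by
  apply List.countP_congr
  intro kv _
  simp only [pvW, pvY, Bool.and_comm]

lemma pvYB (l : List (String × String)) :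
    l.countP (fun kv => PySem.Str.isIn "youtube.com" kv.1) = l.countP pvY := rfl

-- ===== VERDICT (by name: the statement is the Claim_ definition above) =====
theorem get_source_type_summary_py_spec : Claim_equal_get_source_type_summary_py := by
  intro sd _
  unfold Spec_get_source_type_summary_py
  show get_source_type_summary_py sd = get_source_type_summary_py_alt sd
  simp only [get_source_type_summary_py, get_source_type_summary_py_alt]
  rw [show (fun (d : PySem.Dict String Int) (kv : String × String) =>
      if PySem.Str.isIn "youtube.com" kv.1 then
        d.insert "YouTube" (d.getD "YouTube" 0 + 1)
      else if PySem.Str.startswith kv.1 "http" then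
        d.insert "Web" (d.getD "Web" 0 + 1)
      else
        d.insert "Local" (d.getD "Local" 0 + 1)) = pvStep from rfl]
  rw [show (((PySem.Dict.empty).insert "Web" (0:Int)).insert "YouTube" 0).insert "Local" 0
      = pvMkd 0 0 0 from rfl]
  rw [pvLoop]
  rw [show ∀ a b c : Int, (pvMkd a b c).items = [("Web", a), ("YouTube", b), ("Local", c)]
      from fun _ _ _ => rfl]
  rw [pvWB, pvYB]
  rw [show (sd.length : Int) - (sd.countP pvY : Int) - (sd.countP pvW : Int)
      = (0 : Int) + (sd.countP pvL : Int) by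
    have := pvTri sd
    push_cast
    omega]
  norm_num
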